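-- pv_equiv track=rewrite | github.com/njadNissi/home-configs | quick/challenge.py | matrix_validity
-- ===== SOURCE A (Python) =====
-- def matrix_validity(matrix: list[list[int]]) -> bool:
-- 	n = len(matrix)
-- 	# check rows
-- 	for row in matrix:
-- 		if sorted(row) != [*range(1, n+1, 1)]:
-- 			return False
--
-- 	# check columns
-- 	for j in range(n):
-- 		col = set()
-- 		for row in matrix:
-- 			col.add(row[j])
--
-- 		if sorted(col) != [*range(1, n+1, 1)]:
-- 			return False
--
-- 	return True
-- ===== SOURCE B (Python) =====
-- def matrix_validity(matrix: list[list[int]]) -> bool: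
-- 	n = len(matrix)
-- 	cols_seen = [set() for _ in range(n)]
-- 	for row in matrix:
-- 		if len(row) != n:
-- 			return False
-- 		row_seen = set()
-- 		for j, v in enumerate(row):
-- 			if not (1 <= v <= n) or v in row_seen or v in cols_seen[j]:
-- 				return False
-- 			row_seen.add(v)
-- 			cols_seen[j].add(v)
-- 	return True
-- ===== Notes on version B (the rewrite author's own statement) =====
-- stated objective: alternative
-- what changed: A sorts every row and then builds and sorts a set for every column in a second pass; B makes one combined pass over the cells, keeping per-row and per-column seen-sets and checking the 1..n range and duplicates on the fly, with no sorting.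
import Mathlib
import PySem

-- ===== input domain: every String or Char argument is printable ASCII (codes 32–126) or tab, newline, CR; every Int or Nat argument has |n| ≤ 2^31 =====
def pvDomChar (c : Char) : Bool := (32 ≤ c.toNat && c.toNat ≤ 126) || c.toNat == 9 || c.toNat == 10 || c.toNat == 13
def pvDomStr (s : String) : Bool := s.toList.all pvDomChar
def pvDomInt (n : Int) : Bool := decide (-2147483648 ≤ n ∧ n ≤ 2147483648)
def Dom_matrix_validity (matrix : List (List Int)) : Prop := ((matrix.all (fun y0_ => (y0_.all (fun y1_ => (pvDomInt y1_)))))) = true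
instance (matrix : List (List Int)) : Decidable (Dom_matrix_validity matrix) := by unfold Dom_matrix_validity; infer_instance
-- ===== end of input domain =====

-- B replaces A's two sorting passes (sort every row, then build and sort every column set) by one
-- combined cell traversal maintaining per-row and per-column seen-sets; the return values agree everywhere.

-- ===== PORT A =====
-- 'row[j]' of the column pass is ported as pyGetD with default 0: whenever the column pass's value
-- matters (the rows check passed, so every row has length n and 0 ≤ j < n) the index is in range,
-- and when the rows check failed the '&&' is false regardless of the column pass's value.
def matrix_validity (matrix : List (List Int)) : Bool :=
  let n : Int := matrix.length
  (matrix.all (fun row =>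
      PySem.List.sorted row (fun x => x) false == PySem.List.pyRange 1 (n+1) 1))
  &&
  ((PySem.List.pyRange 0 n 1).all (fun j =>
      let col := matrix.foldl (fun s row => PySem.Set.add s (PySem.List.pyGetD row j 0)) PySem.Set.empty
      PySem.List.sorted col (fun x => x) false == PySem.List.pyRange 1 (n+1) 1))

-- ===== PORT B =====
-- inner loop of Source B: walk the row together with the list of per-column seen-sets (index j in lockstep)
def bRow (n : Int) : List Int → PySem.Set Int → List (PySem.Set Int) → Option (List (PySem.Set Int))
  | [], _, cols => some cols
  | _ :: _, _, [] => none   -- unreachable: the row-length guard makes the row and cols equally long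
  | v :: vs, rseen, c :: cs =>
      if !(decide (1 ≤ v) && decide (v ≤ n)) || PySem.Set.contains rseen v || PySem.Set.contains c v then
        none
      else
        match bRow n vs (PySem.Set.add rseen v) cs with
        | none => none
        | some cs' => some (PySem.Set.add c v :: cs')

def bRows (n : Int) : List (List Int) → List (PySem.Set Int) → Bool
  | [], _ => true
  | r :: rs, cols =>
      if (r.length : Int) ≠ n then false
      else
        match bRow n r PySem.Set.empty cols with
        | none => false
        | some cols' => bRows n rs cols'

def matrix_validity_alt (matrix : List (List Int)) : Bool :=
  let n : Int := matrix.length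
  bRows n matrix (List.replicate matrix.length PySem.Set.empty)

-- ===== PRECONDITION & SPEC =====
def Spec_matrix_validity (matrix : List (List Int)) (out : Bool) : Prop := out = matrix_validity_alt matrix
instance (matrix : List (List Int)) (out : Bool) : Decidable (Spec_matrix_validity matrix out) := by unfold Spec_matrix_validity; infer_instance

-- ===== CLAIM (what is proved, stated in full; the proofs are below) =====
def Claim_equal_matrix_validity : Prop := ∀ (matrix : List (List Int)), Dom_matrix_validity matrix → Spec_matrix_validity matrix (matrix_validity matrix)

-- ===== LEMMAS AND PROOFS =====

-- the common characterisation: every row is a length-n duplicate-free list of values in 1..n,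
-- and every column is duplicate-free
def GoodRows (matrix : List (List Int)) (n : Int) : Prop :=
  ∀ r ∈ matrix, (r.length : Int) = n ∧ (∀ v ∈ r, 1 ≤ v ∧ v ≤ n) ∧ r.Nodup

def GoodCols (matrix : List (List Int)) : Prop :=
  ∀ j < matrix.length, (matrix.map (fun r => r.getD j 0)).Nodup

theorem sorted_eq_range_iff (xs : List Int) (n : Int) :
    (PySem.List.sorted xs (fun x => x) false == PySem.List.pyRange 1 (n+1) 1) = true ↔
      xs.Perm (PySem.List.pyRange 1 (n+1) 1) := by
  rw [beq_iff_eq]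
  constructor
  · intro h
    have hp := PySem.List.sorted_perm xs (fun x => x) false
    rw [h] at hp
    exact hp.symm
  · intro h
    exact PySem.List.sorted_eq_of_perm_of_pairwise_lt xs _ (fun x => x) h.symm
      (PySem.List.pairwise_lt_pyRange_one 1 (n+1))

theorem nodup_iff_covers (xs : List Int) (n : Int) (hn : 0 ≤ n)
    (hlen : (xs.length : Int) = n) (hmem : ∀ v ∈ xs, 1 ≤ v ∧ v ≤ n) :
    xs.Nodup ↔ ∀ v, 1 ≤ v → v ≤ n → v ∈ xs := by
  have hsub : xs.toFinset ⊆ Finset.Icc 1 n := by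
    intro v hv
    rcases hmem v (List.mem_toFinset.mp hv) with ⟨h1, h2⟩
    exact Finset.mem_Icc.mpr ⟨h1, h2⟩
  have hcard : (Finset.Icc (1:Int) n).card = n.toNat := by
    rw [Int.card_Icc]; omega
  constructor
  · intro hnd v h1 h2
    have hc1 : xs.toFinset.card = xs.length := List.toFinset_card_of_nodup hnd
    have heq : xs.toFinset = Finset.Icc 1 n := by
      apply Finset.eq_of_subset_of_card_le hsub
      rw [hcard, hc1]; omega
    exact List.mem_toFinset.mp (heq ▸ Finset.mem_Icc.mpr ⟨h1, h2⟩)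
  · intro hcov
    have hsub2 : Finset.Icc 1 n ⊆ xs.toFinset := by
      intro v hv
      rcases Finset.mem_Icc.mp hv with ⟨h1, h2⟩
      exact List.mem_toFinset.mpr (hcov v h1 h2)
    have h1 : n.toNat ≤ xs.toFinset.card := hcard ▸ Finset.card_le_card hsub2
    have h2 : xs.toFinset.card = xs.dedup.length := List.card_toFinset xs
    have h3 : xs.dedup.length ≤ xs.length := (List.dedup_sublist xs).length_le
    have h4 : xs.dedup = xs := (List.dedup_sublist xs).eq_of_length (by omega)
    rw [← List.dedup_eq_self]; exact h4

theorem range_perm_char (xs : List Int) (n : Int) (hn : 0 ≤ n) :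
    xs.Perm (PySem.List.pyRange 1 (n+1) 1) ↔
      (xs.length : Int) = n ∧ (∀ v ∈ xs, 1 ≤ v ∧ v ≤ n) ∧ xs.Nodup := by
  constructor
  · intro h
    refine ⟨?_, ?_, h.nodup_iff.mpr (PySem.List.nodup_pyRange_one 1 (n+1))⟩
    · have := h.length_eq
      rw [PySem.List.length_pyRange_one] at this
      omega
    · intro v hv
      have := PySem.List.mem_pyRange_one.mp (h.mem_iff.mp hv)
      omega
  · rintro ⟨hlen, hmem, hnd⟩
    rw [List.perm_ext_iff_of_nodup hnd (PySem.List.nodup_pyRange_one 1 (n+1))]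
    intro v
    rw [PySem.List.mem_pyRange_one]
    constructor
    · intro hv; have := hmem v hv; omega
    · rintro ⟨h1, h2⟩
      exact (nodup_iff_covers xs n hn hlen hmem).mp hnd v h1 (by omega)

-- A's column check, given that every row passed the row check, is exactly "column j has no duplicate"
theorem colOK_iff (matrix : List (List Int)) (j : ℕ) (hj : j < matrix.length)
    (hR : GoodRows matrix (matrix.length : Int)) :
    ((PySem.List.sorted
        (matrix.foldl (fun s row => PySem.Set.add s (PySem.List.pyGetD row (j : Int) 0)) PySem.Set.empty)
        (fun x => x) false == PySem.List.pyRange 1 ((matrix.length : Int)+1) 1) = true) ↔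
      (matrix.map (fun r => r.getD j 0)).Nodup := by
  set n : Int := (matrix.length : Int) with hn
  set cl : List Int := matrix.map (fun r => r.getD j 0) with hcl
  have hfold : matrix.foldl (fun s row => PySem.Set.add s (PySem.List.pyGetD row (j : Int) 0)) PySem.Set.empty
      = PySem.Set.ofList cl := by
    rw [hcl, PySem.Set.ofList_eq_foldl, List.foldl_map]
    congr 1
    funext s r
    rw [PySem.List.pyGetD_of_nonneg r 0 (Int.natCast_nonneg j), Int.toNat_natCast]
  have hlen : (cl.length : Int) = n := by simp [hcl, hn]
  have hmem : ∀ v ∈ cl, 1 ≤ v ∧ v ≤ n := by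
    intro v hv
    rcases List.mem_map.mp hv with ⟨r, hr, rfl⟩
    obtain ⟨hrlen, hb, -⟩ := hR r hr
    have hjr : j < r.length := by omega
    rw [List.getD_eq_getElem _ _ hjr]
    exact hb _ (List.getElem_mem hjr)
  rw [hfold, sorted_eq_range_iff _ n,
    List.perm_ext_iff_of_nodup (PySem.Set.nodup_ofList cl) (PySem.List.nodup_pyRange_one 1 (n+1))]
  simp only [PySem.Set.mem_ofList, PySem.List.mem_pyRange_one]
  rw [nodup_iff_covers cl n (Int.natCast_nonneg _) hlen hmem]
  constructor
  · intro h v h1 h2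
    exact (h v).mpr ⟨h1, by omega⟩
  · intro h v
    constructor
    · intro hv
      have := hmem v hv
      omega
    · rintro ⟨h1, h2⟩
      exact h v h1 (by omega)

theorem A_char (matrix : List (List Int)) :
    matrix_validity matrix = true ↔
      GoodRows matrix (matrix.length : Int) ∧ GoodCols matrix := by
  unfold matrix_validity
  simp only [Bool.and_eq_true, List.all_eq_true]
  have hrow : (∀ row ∈ matrix,
      (PySem.List.sorted row (fun x => x) false == PySem.List.pyRange 1 ((matrix.length : Int)+1) 1) = true)
      ↔ GoodRows matrix (matrix.length : Int) := by
    unfold GoodRows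
    constructor
    · intro h r hr
      exact (range_perm_char r _ (Int.natCast_nonneg _)).mp
        ((sorted_eq_range_iff r _).mp (h r hr))
    · intro h r hr
      exact (sorted_eq_range_iff r _).mpr
        ((range_perm_char r _ (Int.natCast_nonneg _)).mpr (h r hr))
  rw [hrow]
  constructor
  · rintro ⟨hR, hcols⟩
    refine ⟨hR, ?_⟩
    intro j hj
    have hjm : (j : Int) ∈ PySem.List.pyRange 0 (matrix.length : Int) 1 :=
      PySem.List.mem_pyRange_one.mpr ⟨Int.natCast_nonneg j, by exact_mod_cast hj⟩
    exact (colOK_iff matrix j hj hR).mp (hcols (j : Int) hjm)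
  · rintro ⟨hR, hcols⟩
    refine ⟨hR, ?_⟩
    intro j hjm
    obtain ⟨hj0, hjn⟩ := PySem.List.mem_pyRange_one.mp hjm
    have hjlt : j.toNat < matrix.length := by omega
    have hjc : ((j.toNat : ℕ) : Int) = j := by omega
    have := (colOK_iff matrix j.toNat hjlt hR).mpr (hcols j.toNat hjlt)
    rw [hjc] at this
    exact this

theorem idx_cons (v : Int) (c : PySem.Set Int) (vs : List Int) (cs : List (PySem.Set Int)) :
    (∀ k < vs.length + 1, (v::vs).getD k 0 ∉ (c::cs).getD k PySem.Set.empty) ↔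
      (v ∉ c ∧ ∀ k < vs.length, vs.getD k 0 ∉ cs.getD k PySem.Set.empty) := by
  constructor
  · intro h
    exact ⟨h 0 (by omega), fun k hk => h (k+1) (by omega)⟩
  · rintro ⟨h0, h⟩ k hk
    cases k with
    | zero => exact h0
    | succ k => exact h k (by omega)

theorem bRow_isSome (n : Int) : ∀ (vs : List Int) (cols : List (PySem.Set Int)) (rseen : PySem.Set Int),
    vs.length = cols.length →
    ((bRow n vs rseen cols).isSome = true ↔
      (∀ v ∈ vs, 1 ≤ v ∧ v ≤ n) ∧ vs.Nodup ∧ (∀ v ∈ vs, v ∉ rseen) ∧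
      ∀ k < vs.length, vs.getD k 0 ∉ cols.getD k PySem.Set.empty) := by
  intro vs
  induction vs with
  | nil => intro cols rseen h; simp [bRow]
  | cons v vs ih =>
    intro cols rseen h
    cases cols with
    | nil => simp at h
    | cons c cs =>
      have h' : vs.length = cs.length := by simpa using h
      simp only [bRow]
      by_cases hcond : (!(decide (1 ≤ v) && decide (v ≤ n)) || PySem.Set.contains rseen v || PySem.Set.contains c v) = true
      · rw [if_pos hcond]
        simp only [Option.isSome_none, Bool.false_eq_true, false_iff]
        rintro ⟨hb, hnd, hrs, hidx⟩
        simp only [Bool.or_eq_true, Bool.not_eq_true', Bool.and_eq_false_iff,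
          decide_eq_false_iff_not, PySem.Set.contains_iff] at hcond
        have hv := hb v (List.mem_cons_self)
        have h0 := (idx_cons v c vs cs).mp (by simpa using hidx) |>.1
        rcases hcond with (hc | hc) | hc
        · rcases hc with hc | hc <;> exact hc (by tauto)
        · exact hrs v List.mem_cons_self hc
        · exact h0 hc
      · rw [if_neg hcond]
        simp only [Bool.or_eq_true, Bool.not_eq_true', Bool.and_eq_false_iff,
          decide_eq_false_iff_not, PySem.Set.contains_iff, not_or] at hcond
        obtain ⟨⟨hv1, hv2⟩, hvrs, hvc⟩ :
            (1 ≤ v ∧ v ≤ n) ∧ v ∉ rseen ∧ v ∉ c := by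
          refine ⟨⟨?_, ?_⟩, ?_, ?_⟩ <;> by_contra hx <;> simp [hx] at hcond
        have key :
            ((∀ x ∈ v::vs, 1 ≤ x ∧ x ≤ n) ∧ (v::vs).Nodup ∧ (∀ x ∈ v::vs, x ∉ rseen) ∧
              ∀ k < (v::vs).length, (v::vs).getD k 0 ∉ (c::cs).getD k PySem.Set.empty) ↔
            ((∀ x ∈ vs, 1 ≤ x ∧ x ≤ n) ∧ vs.Nodup ∧ (∀ x ∈ vs, x ∉ PySem.Set.add rseen v) ∧
              ∀ k < vs.length, vs.getD k 0 ∉ cs.getD k PySem.Set.empty) := by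
          simp only [List.mem_cons, List.nodup_cons, List.length_cons, idx_cons,
            PySem.Set.mem_add, not_or, forall_eq_or_imp]
          constructor
          · rintro ⟨⟨_, hb⟩, ⟨hvn, hnd⟩, ⟨_, hrs⟩, _, hidx⟩
            refine ⟨hb, hnd, fun x hx => ⟨hrs x hx, fun he => hvn (he ▸ hx)⟩, hidx⟩
          · rintro ⟨hb, hnd, hrs, hidx⟩
            refine ⟨⟨⟨hv1, hv2⟩, hb⟩, ⟨fun hv => (hrs v hv).2 rfl, hnd⟩,
              ⟨hvrs, fun x hx => (hrs x hx).1⟩, hvc, hidx⟩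
        rcases hr : bRow n vs (PySem.Set.add rseen v) cs with _ | cols'
        · simp only [Option.isSome_none, Bool.false_eq_true, false_iff]
          intro hrhs
          have := (ih cs (PySem.Set.add rseen v) h').mpr (key.mp hrhs)
          rw [hr] at this; simp at this
        · simp only [Option.isSome_some, true_iff]
          refine key.mpr ?_
          have := (ih cs (PySem.Set.add rseen v) h').mp (by rw [hr]; rfl)
          exact this

theorem bRow_some (n : Int) : ∀ (vs : List Int) (cols : List (PySem.Set Int)) (rseen : PySem.Set Int)
    (cols' : List (PySem.Set Int)), vs.length = cols.length → bRow n vs rseen cols = some cols' →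
    cols' = List.zipWith (fun c v => PySem.Set.add c v) cols vs := by
  intro vs
  induction vs with
  | nil =>
    intro cols rseen cols' hlen h
    simp [bRow] at h
    cases cols with
    | nil => simp [← h]
    | cons c cs => simp at hlen
  | cons v vs ih =>
    intro cols rseen cols' hlen h
    cases cols with
    | nil => simp [bRow] at h
    | cons c cs =>
      simp only [bRow] at h
      split at h
      · simp at h
      · rcases hr : bRow n vs (PySem.Set.add rseen v) cs with _ | cs'
        · rw [hr] at h; simp at h
        · rw [hr] at h; simp at h
          rw [← h, List.zipWith_cons_cons, ih cs (PySem.Set.add rseen v) cs' (by simpa using hlen) hr]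
theorem bRows_iff (n : Int) : ∀ (rows : List (List Int)) (cols : List (PySem.Set Int)),
    (cols.length : Int) = n →
    (bRows n rows cols = true ↔
      (∀ r ∈ rows, (r.length : Int) = n ∧ (∀ v ∈ r, 1 ≤ v ∧ v ≤ n) ∧ r.Nodup) ∧
      ∀ j < cols.length, ((rows.map (fun r => r.getD j 0)).Nodup ∧
        ∀ v ∈ rows.map (fun r => r.getD j 0), v ∉ cols.getD j PySem.Set.empty)) := by
  intro rows
  induction rows with
  | nil => intro cols hc; simp [bRows]
  | cons r rs ih =>
    intro cols hc
    simp only [bRows]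
    by_cases hlen : (r.length : Int) ≠ n
    · rw [if_pos hlen]
      simp only [Bool.false_eq_true, false_iff]
      rintro ⟨hrows, _⟩
      exact hlen (hrows r List.mem_cons_self).1
    · rw [if_neg hlen]
      rw [ne_eq, not_not] at hlen
      have hrl : r.length = cols.length := by exact_mod_cast hlen.trans hc.symm
      rcases hr : bRow n r PySem.Set.empty cols with _ | cols'
      · simp only [Bool.false_eq_true, false_iff]
        rintro ⟨hrows, hcols⟩
        have hgood := hrows r List.mem_cons_self
        have : (bRow n r PySem.Set.empty cols).isSome = true := by
          rw [bRow_isSome n r cols PySem.Set.empty hrl]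
          refine ⟨hgood.2.1, hgood.2.2, by simp [PySem.Set.empty], ?_⟩
          intro k hk
          exact (hcols k (by omega)).2 _ (List.mem_map_of_mem List.mem_cons_self)
        rw [hr] at this; simp at this
      · -- successful row
        have hsome := (bRow_isSome n r cols PySem.Set.empty hrl).mp (by rw [hr]; rfl)
        obtain ⟨hb, hnd, -, hidx⟩ := hsome
        have hzip := bRow_some n r cols PySem.Set.empty cols' hrl hr
        have hclen : cols'.length = cols.length := by
          rw [hzip, List.length_zipWith]; omega
        have hc' : (cols'.length : Int) = n := by rw [hclen]; exact hc
        rw [ih cols' hc']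
        have hget : ∀ j < cols.length,
            cols'.getD j PySem.Set.empty = PySem.Set.add (cols.getD j PySem.Set.empty) (r.getD j 0) := by
          intro j hj
          rw [hzip]
          rw [List.getD_eq_getElem _ _ (by rw [List.length_zipWith]; omega),
              List.getD_eq_getElem _ _ hj, List.getD_eq_getElem _ _ (by omega),
              List.getElem_zipWith]
        constructor
        · rintro ⟨hrs, hcols'⟩
          refine ⟨?_, ?_⟩
          · intro x hx
            rcases List.mem_cons.mp hx with rfl | hx
            · exact ⟨hlen, hb, hnd⟩
            · exact hrs x hx
          · intro j hj
            have := hcols' j (by omega)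
            rw [hget j hj] at this
            obtain ⟨hndc, hfr⟩ := this
            simp only [List.map_cons, List.nodup_cons]
            refine ⟨⟨?_, hndc⟩, ?_⟩
            · intro hmem
              exact (hfr _ hmem) (PySem.Set.mem_add _ _ _ |>.mpr (Or.inr rfl))
            · intro v hv
              rcases List.mem_cons.mp hv with rfl | hv
              · exact hidx j (by omega)
              · intro hvc
                exact (hfr v hv) ((PySem.Set.mem_add _ _ _).mpr (Or.inl hvc))
        · rintro ⟨hrows, hcols⟩
          refine ⟨fun x hx => hrows x (List.mem_cons_of_mem r hx), ?_⟩
          intro j hj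
          rw [hget j (by omega)]
          have := hcols j (by omega)
          simp only [List.map_cons, List.nodup_cons] at this
          obtain ⟨⟨hhead, hndc⟩, hfr⟩ := this
          refine ⟨hndc, ?_⟩
          intro v hv hvc
          rcases (PySem.Set.mem_add _ _ _).mp hvc with hvc | rfl
          · exact (hfr v (List.mem_cons_of_mem _ hv)) hvc
          · exact hhead hv

theorem B_char (matrix : List (List Int)) :
    matrix_validity_alt matrix = true ↔
      GoodRows matrix (matrix.length : Int) ∧ GoodCols matrix := by
  unfold matrix_validity_alt
  rw [bRows_iff _ matrix (List.replicate matrix.length PySem.Set.empty) (by simp)]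
  unfold GoodRows GoodCols
  simp [PySem.Set.empty]

-- ===== VERDICT (by name: the statement is the Claim_ definition above) =====
theorem matrix_validity_spec : Claim_equal_matrix_validity := by
  intro matrix _
  unfold Spec_matrix_validity
  have h := (A_char matrix).trans (B_char matrix).symm
  cases hA : matrix_validity matrix <;> cases hB : matrix_validity_alt matrix <;> simp_all
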